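-- pv_equiv track=rewrite | github.com/songkg7/1day-1algorithm | codility/4-1.py | solution
-- ===== SOURCE A (Python) =====
-- def solution(X, A):
--     n = set(A)
--     m = set([i for i in range(1, X + 1)])
--
--     # 절대 건너지 못하는 경우
--     if n & m != m:
--         return -1
--
--     result = set()
--     for i, v in enumerate(A):
--         if v not in result:
--             result.add(v)
--             if m == result:
--                 return i
-- ===== SOURCE B (Python) =====
-- def solution(X, A):
--     # Stage 1: one pass recording the first-occurrence index of every value.
--     first = {}
--     for i, v in enumerate(A):
--         if v not in first:
--             first[v] = i
--     # Stage 2: the answer is the latest first occurrence among 1..X (-1 if one is missing).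
--     best = -1
--     for k in range(1, X + 1):
--         if k not in first:
--             return -1
--         best = max(best, first[k])
--     return best
-- ===== Notes on version B (the rewrite author's own statement) =====
-- stated objective: alternative
-- what changed: B abandons A's incremental seen-set with whole-set equality tests: it builds a first-occurrence index map in one pass and returns the maximum of the first-occurrence indices of 1..X (or -1 if one is missing); Pre_ excludes the inputs (X < 1, or an out-of-range value occurring before the cover of 1..X completes) on which A falls off its loop and returns None instead of an int, where B returns the natural answer.
-- outside the precondition, e.g. on solution(0, []): A returns None, B returns -1; on solution(2, [3, 1, 2]): A returns None, B returns 2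
import Mathlib
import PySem

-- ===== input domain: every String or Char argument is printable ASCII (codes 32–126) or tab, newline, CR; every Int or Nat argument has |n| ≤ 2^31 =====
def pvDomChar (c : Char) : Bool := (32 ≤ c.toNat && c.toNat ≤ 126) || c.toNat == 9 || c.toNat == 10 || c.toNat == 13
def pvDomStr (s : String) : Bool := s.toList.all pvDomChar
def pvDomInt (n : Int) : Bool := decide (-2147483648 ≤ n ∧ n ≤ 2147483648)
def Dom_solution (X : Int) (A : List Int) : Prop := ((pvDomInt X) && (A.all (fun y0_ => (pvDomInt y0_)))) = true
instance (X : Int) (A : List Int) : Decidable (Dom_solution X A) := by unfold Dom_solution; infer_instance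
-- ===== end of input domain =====

-- B replaces A's incremental seen-set with whole-set equality tests by two staged passes: a
-- first-occurrence index map built once, then the maximum first-occurrence index over 1..X
-- (objective: alternative). Python A returns None (no value of type int) on some inputs;
-- those are excluded by Pre_solution.

-- ===== PORT A =====
-- the loop 'for i, v in enumerate(A): …' of A; returns none when the loop falls through (Python None)
def solutionGo (m : PySem.Set Int) : List (Int × Int) → PySem.Set Int → Option Int
  | [], _ => none
  | (i, v) :: rest, result =>
    if v ∈ result then solutionGo m rest result
    else
      let result' := PySem.Set.add result v
      if PySem.Set.equal m result' then some i
      else solutionGo m rest result'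

-- Python A returns None when the loop falls through; Pre_solution excludes those inputs, the
-- port returns 0 there (arbitrary, outside the claim).
def solution (X : Int) (A : List Int) : Int :=
  let n : PySem.Set Int := PySem.Set.ofList A
  -- set([i for i in range(1, X+1)]): the range is Nodup, so the set IS this list
  let m : PySem.Set Int := PySem.List.pyRange 1 (X + 1) 1
  if !(PySem.Set.equal (PySem.Set.inter n m) m) then -1
  else (solutionGo m (PySem.List.enumerate A) PySem.Set.empty).getD 0

-- ===== PORT B =====
-- stage 1: 'for i, v in enumerate(A): if v not in first: first[v] = i'
def altFirst : List (Int × Int) → PySem.Dict Int Int → PySem.Dict Int Int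
  | [], d => d
  | (i, v) :: rest, d =>
    if d.contains v then altFirst rest d
    else altFirst rest (d.insert v i)

-- stage 2: 'for k in range(1, X+1): if k not in first: return -1; best = max(best, first[k])'
def altScan (d : PySem.Dict Int Int) : List Int → Int → Int
  | [], best => best
  | k :: rest, best =>
    if d.contains k then altScan d rest (max best (d.getD k 0))
    else -1

def solution_alt (X : Int) (A : List Int) : Int :=
  altScan (altFirst (PySem.List.enumerate A) PySem.Dict.empty) (PySem.List.pyRange 1 (X + 1) 1) (-1)

-- ===== PRECONDITION & SPEC =====
-- Pre_ excludes exactly the inputs on which Python A falls off the loop and returns None (not an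
-- int): X < 1, or all of 1..X occur in A but some value outside 1..X occurs before the cover is
-- complete.  Inside Pre_ A returns an int: -1 (some of 1..X missing) or the completing index
-- (some prefix of A has value set exactly {1,…,X}).
def Pre_solution (X : Int) (A : List Int) : Prop :=
  1 ≤ X ∧
    -- first disjunct: fewer than X distinct values of 1..X occur in A (A returns -1);
    -- second: some prefix of A stays inside 1..X and has exactly X distinct values
    ((((PySem.Set.ofList (A.filter (fun v => decide (1 ≤ v ∧ v ≤ X)))).length : Int) < X) ∨
      (∃ n ∈ List.range (A.length + 1),
        (∀ v ∈ A.take n, 1 ≤ v ∧ v ≤ X) ∧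
        (((PySem.Set.ofList (A.take n)).length : Int) = X)))
instance (X : Int) (A : List Int) : Decidable (Pre_solution X A) := by
  unfold Pre_solution; infer_instance

def pvWitness_solution : Int × List Int := (2, [2, 1, 3])

def Spec_solution (X : Int) (A : List Int) (out : Int) : Prop := out = solution_alt X A
instance (X : Int) (A : List Int) (out : Int) : Decidable (Spec_solution X A out) := by
  unfold Spec_solution; infer_instance

-- ===== CLAIM (what is proved, stated in full; the proofs are below) =====
def Claim_equal_solution : Prop :=
  ∀ (X : Int) (A : List Int), Dom_solution X A → Pre_solution X A →
    Spec_solution X A (solution X A)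

-- ===== LEMMAS AND PROOFS =====

-- first-occurrence index of value k in an enumerated list (0 when absent; proof-side helper)
def pvFIdx (l : List (Int × Int)) (k : Int) : Int :=
  ((l.find? (fun p => p.2 == k)).map (·.1)).getD 0

lemma pv_find_cons_ne {i v k : Int} {rest : List (Int × Int)} (h : v ≠ k) :
    ((i, v) :: rest).find? (fun p => p.2 == k) = rest.find? (fun p => p.2 == k) :=
  List.find?_cons_of_neg (by simpa using h)

lemma pv_fidx_cons_ne {i v k : Int} {rest : List (Int × Int)} (h : v ≠ k) :
    pvFIdx ((i, v) :: rest) k = pvFIdx rest k := by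
  unfold pvFIdx; rw [pv_find_cons_ne h]

lemma pv_fidx_cons_self {i v : Int} {rest : List (Int × Int)} :
    pvFIdx ((i, v) :: rest) v = i := by
  unfold pvFIdx; rw [List.find?_cons_of_pos (by simp)]; rfl

lemma pv_subset_full {s mm : List Int} (hs : s.Nodup) (_hm : mm.Nodup)
    (hsub : ∀ x ∈ s, x ∈ mm) (hlen : mm.length ≤ s.length) : ∀ x ∈ mm, x ∈ s := by
  have h1 : List.Subperm s mm := hs.subperm (fun {a} ha => hsub a ha)
  have h2 : s.Perm mm := h1.perm_of_length_le hlen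
  intro x hx
  exact h2.mem_iff.mpr hx

lemma pv_mem_snd_enumerate {α : Type} {p : Int × α} {xs : List α} {st : Int}
    (h : p ∈ PySem.List.enumerate xs st) : p.2 ∈ xs := by
  rcases (PySem.List.mem_enumerate_iff _ _ _).mp h with ⟨k, hk, rfl⟩
  exact List.getElem_mem hk

-- what altFirst's dict answers: the stored value, else the first occurrence in the list
lemma pv_altFirst_get? (l : List (Int × Int)) :
    ∀ (d : PySem.Dict Int Int) (k : Int),
      (altFirst l d).get? k = (d.get? k).or ((l.find? (fun p => p.2 == k)).map (·.1)) := by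
  induction l with
  | nil => intro d k; simp [altFirst]
  | cons hd rest ih =>
    intro d k
    obtain ⟨i, v⟩ := hd
    by_cases hc : d.contains v = true
    · have hsome : (d.get? v).isSome := by
        rw [← PySem.Dict.contains_eq_isSome_get?]; exact hc
      by_cases hk : v = k
      · subst hk
        rw [altFirst, if_pos hc, ih d v]
        rcases Option.isSome_iff_exists.mp hsome with ⟨j, hj⟩
        simp [hj]
      · rw [altFirst, if_pos hc, ih d k]
        have hne : (fun p : Int × Int => p.2 == k) (i, v) = false := by simp [hk]
        rw [List.find?_cons_of_neg (by simpa using hne)]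
    · rw [altFirst, if_neg hc, ih (d.insert v i) k]
      by_cases hk : v = k
      · subst hk
        have hnone : d.get? v = none := by
          rw [Option.eq_none_iff_forall_ne_some]
          intro j hj
          have hcc : d.contains v = (d.get? v).isSome := PySem.Dict.contains_eq_isSome_get? d v
          rw [hj] at hcc
          simp [hcc] at hc
        rw [PySem.Dict.get?_insert_self, hnone,
          List.find?_cons_of_pos (by simp)]
        simp
      · rw [PySem.Dict.get?_insert_of_ne _ _ (fun h => hk h.symm)]
        have hne : (fun p : Int × Int => p.2 == k) (i, v) = false := by simp [hk]
        rw [List.find?_cons_of_neg (by simpa using hne)]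

-- B's second loop returns -1 as soon as a key of ks is missing from d
lemma pv_altScan_miss (d : PySem.Dict Int Int) :
    ∀ (ks : List Int) (b : Int), (∃ k ∈ ks, d.get? k = none) → altScan d ks b = -1 := by
  intro ks
  induction ks with
  | nil => intro b h; simp at h
  | cons k rest ih =>
    intro b h
    by_cases hc : d.contains k = true
    · rw [altScan, if_pos hc]
      refine ih _ ?_
      rcases h with ⟨k', hk', hn⟩
      rcases List.mem_cons.mp hk' with rfl | hk'
      · rw [PySem.Dict.contains_eq_isSome_get?, hn] at hc; simp at hc
      · exact ⟨k', hk', hn⟩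
    · rw [altScan, if_neg hc]

-- B's second loop computes the maximum of the stored values when every key is present
lemma pv_altScan_max (d : PySem.Dict Int Int) (i : Int) :
    ∀ (ks : List Int) (b : Int),
      (∀ k ∈ ks, (d.get? k).isSome) →
      (∀ k ∈ ks, (d.get? k).getD 0 ≤ i) →
      ((∃ k ∈ ks, (d.get? k).getD 0 = i) ∨ b = i) → b ≤ i →
      altScan d ks b = i := by
  intro ks
  induction ks with
  | nil =>
    intro b _ _ hw _
    rcases hw with h | rfl
    · simp at h
    · simp [altScan]
  | cons k rest ih =>
    intro b hsome hle hw hb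
    have hks : (d.get? k).isSome := hsome k List.mem_cons_self
    have hc : d.contains k = true := by
      rw [PySem.Dict.contains_eq_isSome_get?]; exact hks
    rcases Option.isSome_iff_exists.mp hks with ⟨j, hj⟩
    have hgD : d.getD k 0 = j := PySem.Dict.getD_of_get?_eq_some d 0 hj
    have hji : j ≤ i := by have := hle k List.mem_cons_self; rwa [hj, Option.getD_some] at this
    rw [altScan, if_pos hc, hgD]
    refine ih (max b j) (fun x hx => hsome x (List.mem_cons_of_mem _ hx))
      (fun x hx => hle x (List.mem_cons_of_mem _ hx)) ?_ (by omega)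
    rcases hw with ⟨k', hk', hv⟩ | rfl
    · rcases List.mem_cons.mp hk' with rfl | hk'
      · right; rw [hj, Option.getD_some] at hv; omega
      · exact Or.inl ⟨k', hk', hv⟩
    · right; omega

-- A's loop returns the largest first-occurrence index of a still-needed value of m
lemma pv_goA (m : List Int) :
    ∀ (l : List (Int × Int)) (s : PySem.Set Int),
      l.Pairwise (fun p q => p.1 < q.1) →
      (∀ x ∈ s, x ∈ m) →
      (∃ n ≤ l.length, (∀ p ∈ l.take n, p.2 ∈ m) ∧
        (∀ k ∈ m, k ∈ s ∨ ∃ p ∈ l.take n, p.2 = k)) →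
      (∃ k ∈ m, k ∉ s) →
      ∃ i, solutionGo m l s = some i ∧
        (∀ k ∈ m, k ∉ s → pvFIdx l k ≤ i) ∧
        (∃ k ∈ m, k ∉ s ∧ l.find? (fun p => p.2 == k) = some (i, k)) := by
  intro l
  induction l with
  | nil =>
    intro s _ _ hpre hne
    rcases hpre with ⟨n, hn, _, hcov⟩
    have hn0 : n = 0 := by simpa using hn
    subst hn0
    rcases hne with ⟨k, hk, hks⟩
    rcases hcov k hk with h | ⟨p, hp, _⟩
    · exact absurd h hks
    · simp at hp
  | cons hd rest ih =>
    intro s hpw hsub hpre hne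
    obtain ⟨i, v⟩ := hd
    rcases hpre with ⟨n, hn, hin, hcov⟩
    rcases n with _ | n'
    · exfalso
      rcases hne with ⟨k, hk, hks⟩
      rcases hcov k hk with h | ⟨p, hp, _⟩
      · exact hks h
      · simp at hp
    · have htake : ((i, v) :: rest).take (n' + 1) = (i, v) :: rest.take n' :=
        List.take_succ_cons
      have hvm : v ∈ m := hin (i, v) (htake ▸ List.mem_cons_self)
      have hn' : n' ≤ rest.length := by simpa using hn
      have hin' : ∀ p ∈ rest.take n', p.2 ∈ m :=
        fun p hp => hin p (htake ▸ List.mem_cons_of_mem _ hp)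
      have hpwt : rest.Pairwise (fun p q : Int × Int => p.1 < q.1) :=
        (List.pairwise_cons.mp hpw).2
      by_cases hvs : v ∈ s
      · -- value seen before: A skips it
        have hcov' : ∀ k ∈ m, k ∈ s ∨ ∃ p ∈ rest.take n', p.2 = k := by
          intro k hk
          rcases hcov k hk with h | ⟨p, hp, hpk⟩
          · exact Or.inl h
          · rw [htake] at hp
            rcases List.mem_cons.mp hp with rfl | hp
            · have hvk : v = k := hpk
              exact Or.inl (hvk ▸ hvs)
            · exact Or.inr ⟨p, hp, hpk⟩
        obtain ⟨i', hgo, hbd, k₁, hk₁m, hk₁s, hfind⟩ :=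
          ih s hpwt hsub ⟨n', hn', hin', hcov'⟩ hne
        have hk₁v : v ≠ k₁ := by intro h; exact hk₁s (h ▸ hvs)
        refine ⟨i', ?_, ?_, ⟨k₁, hk₁m, hk₁s, ?_⟩⟩
        · simp only [solutionGo, if_pos hvs]; exact hgo
        · intro k hk hks
          rw [pv_fidx_cons_ne (by intro h; exact hks (h ▸ hvs))]
          exact hbd k hk hks
        · rw [pv_find_cons_ne hk₁v]; exact hfind
      · -- new value v
        have hadd : PySem.Set.add s v = s ++ [v] := PySem.Set.add_of_not_mem hvs
        have hsub' : ∀ x ∈ s ++ [v], x ∈ m := by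
          intro x hx
          rcases List.mem_append.mp hx with h | h
          · exact hsub x h
          · simpa using (List.mem_singleton.mp h ▸ hvm)
        by_cases hfull : ∀ k ∈ m, k ∈ s ++ [v]
        · -- the cover completes here: A returns i
          have heq : PySem.Set.equal m (s ++ [v]) = true := by
            rw [PySem.Set.equal_iff]
            intro x
            exact ⟨fun hx => hfull x hx, fun hx => hsub' x hx⟩
          refine ⟨i, ?_, ?_, ⟨v, hvm, hvs, ?_⟩⟩
          · simp only [solutionGo, if_neg hvs, hadd]
            rw [if_pos heq]
          · intro k hk hks
            have hkv : k = v := by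
              rcases List.mem_append.mp (hfull k hk) with h | h
              · exact absurd h hks
              · simpa using h
            subst hkv
            rw [pv_fidx_cons_self]
          · rw [List.find?_cons_of_pos (by simp)]
        · -- still missing some value: A recurses with s ∪ {v}
          push_neg at hfull
          rcases hfull with ⟨k₀, hk₀m, hk₀s⟩
          have heq : PySem.Set.equal m (s ++ [v]) = false := by
            rw [Bool.eq_false_iff]
            intro h
            rw [PySem.Set.equal_iff] at h
            exact hk₀s ((h k₀).mp hk₀m)
          have hcov' : ∀ k ∈ m, k ∈ s ++ [v] ∨ ∃ p ∈ rest.take n', p.2 = k := by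
            intro k hk
            rcases hcov k hk with h | ⟨p, hp, hpk⟩
            · exact Or.inl (List.mem_append.mpr (Or.inl h))
            · rw [htake] at hp
              rcases List.mem_cons.mp hp with rfl | hp
              · have hvk : v = k := hpk
                exact Or.inl (List.mem_append.mpr (Or.inr (by simp [hvk])))
              · exact Or.inr ⟨p, hp, hpk⟩
          obtain ⟨i', hgo, hbd, k₁, hk₁m, hk₁s', hfind⟩ :=
            ih (s ++ [v]) hpwt hsub' ⟨n', hn', hin', hcov'⟩ ⟨k₀, hk₀m, hk₀s⟩
          have hk₁v : v ≠ k₁ :=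
            by intro h; exact hk₁s' (h ▸ List.mem_append.mpr (Or.inr (by simp)))
          have hk₁s : k₁ ∉ s := fun h => hk₁s' (List.mem_append.mpr (Or.inl h))
          have hmem : (i', k₁) ∈ rest := List.mem_of_find?_eq_some hfind
          have hii' : i < i' := (List.pairwise_cons.mp hpw).1 (i', k₁) hmem
          refine ⟨i', ?_, ?_, ⟨k₁, hk₁m, hk₁s, ?_⟩⟩
          · simp only [solutionGo, if_neg hvs, hadd]
            rw [if_neg (by simp [heq])]
            exact hgo
          · intro k hk hks
            by_cases hkv : k = v
            · subst hkv
              rw [pv_fidx_cons_self]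
              omega
            · rw [pv_fidx_cons_ne (by intro h; exact hkv h.symm)]
              exact hbd k hk (by
                intro h
                rcases List.mem_append.mp h with h | h
                · exact hks h
                · exact hkv (by simpa using h))
          · rw [pv_find_cons_ne hk₁v]; exact hfind

-- the count in Pre_'s first disjunct is below X exactly when some value of 1..X is missing from A
lemma pv_missing_iff (X : Int) (A : List Int) (hX : 1 ≤ X) :
    (((PySem.Set.ofList (A.filter (fun v => decide (1 ≤ v ∧ v ≤ X)))).length : Int) < X) ↔
      ∃ k ∈ PySem.List.pyRange 1 (X + 1) 1, k ∉ A := by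
  have hmnd : (PySem.List.pyRange 1 (X + 1) 1).Nodup := PySem.List.nodup_pyRange_one 1 (X + 1)
  have hmlen : ((PySem.List.pyRange 1 (X + 1) 1).length : Int) = X := by
    rw [PySem.List.length_pyRange_one]; omega
  have hSnd : (PySem.Set.ofList (A.filter (fun v => decide (1 ≤ v ∧ v ≤ X)))).Nodup :=
    PySem.Set.nodup_ofList _
  have hSmem : ∀ x, x ∈ PySem.Set.ofList (A.filter (fun v => decide (1 ≤ v ∧ v ≤ X))) ↔
      x ∈ A ∧ (1 ≤ x ∧ x ≤ X) := by
    intro x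
    rw [PySem.Set.mem_ofList, List.mem_filter]
    simp
  constructor
  · intro hlt
    by_contra h
    push_neg at h
    have hsub : ∀ k ∈ PySem.List.pyRange 1 (X + 1) 1,
        k ∈ PySem.Set.ofList (A.filter (fun v => decide (1 ≤ v ∧ v ≤ X))) := by
      intro k hk
      have hkr := PySem.List.mem_pyRange_one.mp hk
      exact (hSmem k).mpr ⟨h k hk, hkr.1, by omega⟩
    have h1 := (hmnd.subperm (fun {a} ha => hsub a ha)).length_le
    omega
  · rintro ⟨k, hk, hkA⟩
    by_contra hlt
    push_neg at hlt
    have hsub : ∀ x ∈ PySem.Set.ofList (A.filter (fun v => decide (1 ≤ v ∧ v ≤ X))),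
        x ∈ PySem.List.pyRange 1 (X + 1) 1 := by
      intro x hx
      have := (hSmem x).mp hx
      exact PySem.List.mem_pyRange_one.mpr ⟨this.2.1, by omega⟩
    have := pv_subset_full hSnd hmnd hsub (by omega) k hk
    exact hkA ((hSmem k).mp this).1

-- ===== VERDICT (by name: the statement is the Claim_ definition above) =====
theorem solution_spec : Claim_equal_solution := by
  intro X A _ hpre
  obtain ⟨hX, hdisj⟩ := hpre
  unfold Spec_solution solution solution_alt
  have hmnd : (PySem.List.pyRange 1 (X + 1) 1).Nodup := PySem.List.nodup_pyRange_one 1 (X + 1)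
  have hmm : ∀ x, x ∈ PySem.List.pyRange 1 (X + 1) 1 ↔ 1 ≤ x ∧ x < X + 1 := by
    intro x; exact PySem.List.mem_pyRange_one
  have hmlen : ((PySem.List.pyRange 1 (X + 1) 1).length : Int) = X := by
    rw [PySem.List.length_pyRange_one]; omega
  have hdget : ∀ k, (altFirst (PySem.List.enumerate A) PySem.Dict.empty).get? k
      = ((PySem.List.enumerate A).find? (fun p => p.2 == k)).map (·.1) := by
    intro k
    rw [pv_altFirst_get? _ PySem.Dict.empty k, PySem.Dict.get?_empty]
    simp
  by_cases hsubA : ∀ k ∈ PySem.List.pyRange 1 (X + 1) 1, k ∈ A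
  · -- all of 1..X occur in A: A's guard passes, use the exact-prefix disjunct of Pre_
    have hP2 : ∃ n ∈ List.range (A.length + 1),
        (∀ v ∈ A.take n, 1 ≤ v ∧ v ≤ X) ∧
        (((PySem.Set.ofList (A.take n)).length : Int) = X) := by
      rcases hdisj with h | h
      · rcases (pv_missing_iff X A hX).mp h with ⟨k, hk, hkA⟩
        exact absurd (hsubA k hk) hkA
      · exact h
    rcases hP2 with ⟨n₀, hn₀, hrange, hcount⟩
    have hSnd : (PySem.Set.ofList (A.take n₀)).Nodup := PySem.Set.nodup_ofList _
    have hSsub : ∀ x ∈ PySem.Set.ofList (A.take n₀), x ∈ PySem.List.pyRange 1 (X + 1) 1 := by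
      intro x hx
      rw [PySem.Set.mem_ofList] at hx
      have := hrange x hx
      exact (hmm x).mpr ⟨this.1, by omega⟩
    have hcov : ∀ k ∈ PySem.List.pyRange 1 (X + 1) 1, k ∈ A.take n₀ := by
      intro k hk
      have := pv_subset_full hSnd hmnd hSsub (by omega) k hk
      rwa [PySem.Set.mem_ofList] at this
    have hguard : PySem.Set.equal
        (PySem.Set.inter (PySem.Set.ofList A) (PySem.List.pyRange 1 (X + 1) 1))
        (PySem.List.pyRange 1 (X + 1) 1) = true := by
      rw [PySem.Set.equal_iff]
      intro x
      rw [PySem.Set.mem_inter, PySem.Set.mem_ofList]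
      exact ⟨fun hx => hx.2, fun hx => ⟨hsubA x hx, hx⟩⟩
    have hsnd : (((PySem.List.enumerate A).take n₀).map (·.2)) = A.take n₀ := by
      rw [List.map_take, PySem.List.map_snd_enumerate]
    obtain ⟨i, hgo, hbd, k₁, hk₁m, _, hfind⟩ :=
      pv_goA (PySem.List.pyRange 1 (X + 1) 1) (PySem.List.enumerate A) PySem.Set.empty
        (PySem.List.pairwise_lt_enumerate A 0)
        (by intro x hx; simp [PySem.Set.empty] at hx)
        ⟨n₀, by rw [PySem.List.length_enumerate]; simp only [List.mem_range] at hn₀; omega,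
          by
            intro p hp
            have hp2 : p.2 ∈ A.take n₀ := by
              rw [← hsnd]; exact List.mem_map_of_mem hp
            exact (hmm p.2).mpr ⟨(hrange p.2 hp2).1, by have := (hrange p.2 hp2).2; omega⟩,
          by
            intro k hk
            refine Or.inr ?_
            have : k ∈ (((PySem.List.enumerate A).take n₀).map (·.2)) := by
              rw [hsnd]; exact hcov k hk
            rcases List.mem_map.mp this with ⟨p, hp, hpk⟩
            exact ⟨p, hp, hpk⟩⟩
        ⟨1, (hmm 1).mpr ⟨le_refl 1, by omega⟩, by simp [PySem.Set.empty]⟩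
    have hi0 : 0 ≤ i := by
      have hmem := List.mem_of_find?_eq_some hfind
      rcases (PySem.List.mem_enumerate_iff _ _ _).mp hmem with ⟨kk, hkk, heqp⟩
      have : i = 0 + (kk : Int) := congrArg Prod.fst heqp
      omega
    have hB : altScan (altFirst (PySem.List.enumerate A) PySem.Dict.empty)
        (PySem.List.pyRange 1 (X + 1) 1) (-1) = i := by
      refine pv_altScan_max _ i _ _ ?_ ?_ ?_ (by omega)
      · intro k hk
        rw [hdget]
        have hkA : k ∈ (PySem.List.enumerate A).map (·.2) := by
          rw [PySem.List.map_snd_enumerate]; exact hsubA k hk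
        rcases List.mem_map.mp hkA with ⟨p, hp, hpk⟩
        have : ((PySem.List.enumerate A).find? (fun p => p.2 == k)).isSome :=
          List.find?_isSome.mpr ⟨p, hp, by simp [hpk]⟩
        rcases Option.isSome_iff_exists.mp this with ⟨q, hq⟩
        simp [hq]
      · intro k hk
        rw [hdget]
        have := hbd k hk (by simp [PySem.Set.empty])
        unfold pvFIdx at this
        exact this
      · refine Or.inl ⟨k₁, hk₁m, ?_⟩
        rw [hdget, hfind]
        rfl
    simp only [PySem.Set.empty] at hgo hB
    simp [hguard, hgo, hB]
  · -- some k of 1..X never occurs in A: both return -1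
    push_neg at hsubA
    rcases hsubA with ⟨k, hk, hkA⟩
    have hguard : PySem.Set.equal
        (PySem.Set.inter (PySem.Set.ofList A) (PySem.List.pyRange 1 (X + 1) 1))
        (PySem.List.pyRange 1 (X + 1) 1) = false := by
      rw [Bool.eq_false_iff]
      intro h
      rw [PySem.Set.equal_iff] at h
      have := (h k).mpr hk
      rw [PySem.Set.mem_inter, PySem.Set.mem_ofList] at this
      exact hkA this.1
    have hnone : (PySem.List.enumerate A).find? (fun p => p.2 == k) = none := by
      rw [List.find?_eq_none]
      intro p hp hpk
      have hp2 : p.2 = k := by simpa using hpk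
      exact hkA (hp2 ▸ pv_mem_snd_enumerate hp)
    have hB : altScan (altFirst (PySem.List.enumerate A) PySem.Dict.empty)
        (PySem.List.pyRange 1 (X + 1) 1) (-1) = -1 := by
      refine pv_altScan_miss _ _ _ ⟨k, hk, ?_⟩
      rw [hdget, hnone]
      rfl
    simp [hguard, hB]
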